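-- pv_equiv track=rewrite | github.com/ZhaoYuLeo/cs61a | mt/61a-fa15-mt1e/deja_vu.py | subsum2
-- ===== SOURCE A (Python) =====
-- def subsum2(n, k):
--     """Return the maximum sum of up to k consecutive digits in n.
--     >>> subsum2(162553, 1) # 6
--     6
--     >>> subsum2(162553, 2) # 5 + 5
--     10
--     >>> subsum2(162553, 3) # 6 + 2 + 5 OR 5 + 5 + 3
--     13
--     >>> subsum2(5, 0)
--     0
--     >>> subsum2(5432, 100) # 5 + 4 + 3 + 2
--     14
--     """
--     largest = 0
--     while n:
--         copy, total, index = n, 0, 0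
--         while index < k:
--             total += copy % 10
--             copy = copy // 10
--             index += 1
--         largest = max(largest, total)
--         n = n // 10
--     return largest
-- ===== SOURCE B (Python) =====
-- def subsum2(n, k):
--     """Return the maximum sum of up to k consecutive digits in n."""
--     digits = []
--     while n > 0:
--         digits.append(n % 10)
--         n //= 10
--     m = max(0, min(k, len(digits)))
--     best = window = sum(digits[:m])
--     for i in range(m, len(digits)):
--         window += digits[i] - digits[i - m]
--         best = max(best, window)
--     return best
-- ===== Notes on version B (the rewrite author's own statement) =====
-- stated objective: faster
-- what changed: A rescans up to k digits from every position (O(D*k)); B builds the digit list once and takes one O(D) sliding-window pass (prefix window updated by adding the entering digit and subtracting the leaving one).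
import Mathlib
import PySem

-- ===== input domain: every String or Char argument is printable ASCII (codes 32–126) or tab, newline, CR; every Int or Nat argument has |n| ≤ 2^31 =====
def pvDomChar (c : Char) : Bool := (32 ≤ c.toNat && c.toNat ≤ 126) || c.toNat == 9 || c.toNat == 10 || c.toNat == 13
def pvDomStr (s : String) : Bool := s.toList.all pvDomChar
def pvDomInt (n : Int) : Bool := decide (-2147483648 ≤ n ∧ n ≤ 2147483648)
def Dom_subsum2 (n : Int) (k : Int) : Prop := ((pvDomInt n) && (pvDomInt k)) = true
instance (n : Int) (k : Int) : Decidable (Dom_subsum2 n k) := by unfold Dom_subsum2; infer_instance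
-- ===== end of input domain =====

-- B replaces A's O(D·k) rescan of k digits at every position by one O(D) sliding-window
-- pass over the digit list (objective: faster, asymptotic).

-- ===== PORT A =====
-- inner 'while index < k' loop: total += copy % 10; copy //= 10; index += 1
def subsum2Inner (copy total index k : Int) : Int :=
  if index < k then
    subsum2Inner (PySem.Int.floordiv copy 10) (total + PySem.Int.mod copy 10) (index + 1) k
  else total
termination_by (k - index).toNat
decreasing_by omega

-- outer 'while n' loop (guard written 0 < n only to totalize: Python never returns for n < 0,
-- which Pre_subsum2 excludes; for n ≥ 0 the two guards coincide)
def subsum2Loop (n largest k : Int) : Int :=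
  if _h : 0 < n then
    subsum2Loop (PySem.Int.floordiv n 10) (max largest (subsum2Inner n 0 0 k)) k
  else largest
termination_by n.toNat
decreasing_by
  rw [PySem.Int.floordiv_eq_ediv_of_pos (by norm_num)]; omega

def subsum2 (n : Int) (k : Int) : Int := subsum2Loop n 0 k

-- ===== PORT B =====
-- 'while n > 0: digits.append(n % 10); n //= 10' — little-endian digit list
def altDigits (n : Int) : List Int :=
  if _h : 0 < n then PySem.Int.mod n 10 :: altDigits (PySem.Int.floordiv n 10) else []
termination_by n.toNat
decreasing_by
  rw [PySem.Int.floordiv_eq_ediv_of_pos (by norm_num)]; omega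

def subsum2_alt (n : Int) (k : Int) : Int :=
  let digits := altDigits n
  let m : Int := max 0 (min k (digits.length : Int))
  let w0 : Int := (PySem.List.slice digits none (some m)).sum   -- sum(digits[:m])
  let res := (PySem.List.pyRange m (digits.length : Int) 1).foldl
    (fun bw i =>
      let w := bw.2 + PySem.List.pyGetD digits i 0 - PySem.List.pyGetD digits (i - m) 0
      (max bw.1 w, w)) (w0, w0)
  res.1

-- ===== PRECONDITION & SPEC =====
-- Pre_ excludes n < 0 only: there Python A's 'while n' never terminates (n //= 10 stalls at -1).
def Pre_subsum2 (n : Int) (k : Int) : Prop := 0 ≤ n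
instance (n : Int) (k : Int) : Decidable (Pre_subsum2 n k) := by unfold Pre_subsum2; infer_instance
def pvWitness_subsum2 : Int × Int := (162553, 3)

def Spec_subsum2 (n : Int) (k : Int) (out : Int) : Prop := out = subsum2_alt n k
instance (n : Int) (k : Int) (out : Int) : Decidable (Spec_subsum2 n k out) := by unfold Spec_subsum2; infer_instance

-- ===== CLAIM (what is proved, stated in full; the proofs are below) =====
def Claim_equal_subsum2 : Prop := ∀ (n : Int) (k : Int), Dom_subsum2 n k → Pre_subsum2 n k → Spec_subsum2 n k (subsum2 n k)

-- ===== LEMMAS AND PROOFS =====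

-- window sum: the sum of the digits L[i], L[i+1], …, clipped to at most m of them
def winS (L : List Int) (m i : Nat) : Int := ((L.drop i).take m).sum

-- abstract form of A's outer loop over the digit list
def aSpec (K : Nat) : List Int → Int → Int
  | [], acc => acc
  | d :: t, acc => aSpec K t (max acc ((List.take K (d :: t)).sum))

-- abstract form of B's sliding-window loop: c steps remaining, j windows consumed, b = best so far
def bRec (L : List Int) (m : Nat) : Nat → Nat → Int → Int
  | 0, _, b => b
  | c + 1, j, b => bRec L m c (j + 1) (max b (winS L m (j + 1)))

theorem altDigits_pos {n : Int} (h : 0 < n) :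
    altDigits n = PySem.Int.mod n 10 :: altDigits (PySem.Int.floordiv n 10) := by
  rw [altDigits]; simp [h]

theorem altDigits_nonpos {n : Int} (h : ¬ 0 < n) : altDigits n = [] := by
  rw [altDigits]; simp [h]

theorem altDigits_nonneg : ∀ (d : Nat) (n : Int), n.toNat ≤ d → ∀ x ∈ altDigits n, 0 ≤ x := by
  intro d
  induction d with
  | zero =>
    intro n hn x hx
    rw [altDigits_nonpos (by omega)] at hx
    simp at hx
  | succ d ih =>
    intro n hn x hx
    by_cases h : 0 < n
    · rw [altDigits_pos h] at hx
      rcases List.mem_cons.mp hx with hx | hx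
      · exact hx ▸ PySem.Int.mod_nonneg _ (by norm_num)
      · refine ih (PySem.Int.floordiv n 10) ?_ x hx
        rw [PySem.Int.floordiv_eq_ediv_of_pos (by norm_num)]; omega
    · rw [altDigits_nonpos h] at hx; simp at hx

theorem inner_eq : ∀ (j : Nat) (c t i k : Int), 0 ≤ c → k - i = (j : Int) →
    subsum2Inner c t i k = t + ((altDigits c).take j).sum := by
  intro j
  induction j with
  | zero =>
    intro c t i k _ hki
    rw [subsum2Inner]
    simp [show ¬ i < k by omega]
  | succ j ih =>
    intro c t i k hc hki
    rw [subsum2Inner]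
    simp only [show i < k by omega, if_pos]
    have hc' : 0 ≤ PySem.Int.floordiv c 10 := by
      rw [PySem.Int.floordiv_eq_ediv_of_pos (by norm_num)]; omega
    rw [ih (PySem.Int.floordiv c 10) (t + PySem.Int.mod c 10) (i + 1) k hc' (by omega)]
    by_cases h : 0 < c
    · rw [altDigits_pos h, List.take_succ_cons, List.sum_cons]; ring
    · have hc0 : c = 0 := by omega
      subst hc0
      have e : altDigits 0 = [] := altDigits_nonpos (by omega)
      have h1 : PySem.Int.mod 0 10 = 0 := by decide
      have h2 : PySem.Int.floordiv 0 10 = 0 := by decide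
      simp [e]

theorem inner_top (c k : Int) (hc : 0 ≤ c) :
    subsum2Inner c 0 0 k = ((altDigits c).take k.toNat).sum := by
  by_cases hk : 0 < k
  · rw [inner_eq k.toNat c 0 0 k hc (by omega)]; ring
  · rw [subsum2Inner]
    simp [show ¬ (0:Int) < k from hk, show k.toNat = 0 by omega]

theorem loop_eq : ∀ (d : Nat) (n largest k : Int), 0 ≤ n → n.toNat ≤ d →
    subsum2Loop n largest k = aSpec k.toNat (altDigits n) largest := by
  intro d
  induction d with
  | zero =>
    intro n largest k hn hd
    have h0 : ¬ 0 < n := by omega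
    rw [subsum2Loop, altDigits_nonpos h0]
    simp [h0, aSpec]
  | succ d ih =>
    intro n largest k hn hd
    by_cases h : 0 < n
    · have hdiv : 0 ≤ PySem.Int.floordiv n 10 ∧ (PySem.Int.floordiv n 10).toNat ≤ d := by
        rw [PySem.Int.floordiv_eq_ediv_of_pos (by norm_num)]; omega
      rw [subsum2Loop]
      simp only [h, dif_pos]
      rw [ih _ _ k hdiv.1 hdiv.2, altDigits_pos h, aSpec, inner_top n k (by omega),
        altDigits_pos h]
    · rw [subsum2Loop, altDigits_nonpos h]
      simp [h, aSpec]

theorem aSpec_le {K : Nat} {z : Int} :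
    ∀ (L : List Int) (acc : Int), acc ≤ z → (∀ i, i < L.length → winS L K i ≤ z) →
      aSpec K L acc ≤ z := by
  intro L
  induction L with
  | nil => intro acc hacc _; exact hacc
  | cons d t ih =>
    intro acc hacc hw
    refine ih _ (max_le hacc ?_) ?_
    · have := hw 0 (by simp)
      simpa [winS] using this
    · intro i hi
      have := hw (i + 1) (by simpa using Nat.succ_lt_succ hi)
      simpa [winS] using this

theorem le_aSpec_acc {K : Nat} : ∀ (L : List Int) (acc : Int), acc ≤ aSpec K L acc := by
  intro L
  induction L with
  | nil => intro acc; exact le_refl _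
  | cons d t ih =>
    intro acc
    exact le_trans (le_max_left _ _) (ih _)

theorem le_aSpec_win {K : Nat} :
    ∀ (L : List Int) (acc : Int) (i : Nat), i < L.length → winS L K i ≤ aSpec K L acc := by
  intro L
  induction L with
  | nil => intro acc i hi; simp at hi
  | cons d t ih =>
    intro acc i hi
    cases i with
    | zero =>
      refine le_trans ?_ (le_aSpec_acc (K := K) t (max acc ((List.take K (d :: t)).sum)))
      simp [winS]
    | succ i =>
      have := ih (max acc ((List.take K (d :: t)).sum)) i (by simpa using Nat.lt_of_succ_lt_succ hi)
      simpa [winS, aSpec] using this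

theorem winS_succ (L : List Int) (m j : Nat) (h : j + m < L.length) :
    winS L m (j + 1) = winS L m j + L.getD (j + m) 0 - L.getD j 0 := by
  have hj : j < L.length := by omega
  have h1 : ((L.drop j).take (m + 1)).sum = winS L m j + L[j + m] := by
    rw [List.take_add_one]
    have : (L.drop j)[m]? = some L[j + m] := by
      rw [List.getElem?_drop]
      exact List.getElem?_eq_getElem h
    rw [this]
    simp [winS]
  have h2 : ((L.drop j).take (m + 1)).sum = L[j] + winS L m (j + 1) := by
    rw [List.drop_eq_getElem_cons hj, List.take_succ_cons, List.sum_cons]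
    rfl
  rw [List.getD_eq_getElem L 0 h, List.getD_eq_getElem L 0 hj]
  omega

theorem le_bRec_b {L : List Int} {m : Nat} :
    ∀ (c j : Nat) (b : Int), b ≤ bRec L m c j b := by
  intro c
  induction c with
  | zero => intro j b; exact le_refl _
  | succ c ih =>
    intro j b
    exact le_trans (le_max_left _ _) (ih _ _)

theorem le_bRec_win {L : List Int} {m : Nat} :
    ∀ (c j : Nat) (b : Int) (j' : Nat), j < j' → j' ≤ j + c → winS L m j' ≤ bRec L m c j b := by
  intro c
  induction c with
  | zero => intro j b j' h1 h2; omega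
  | succ c ih =>
    intro j b j' h1 h2
    by_cases h : j' = j + 1
    · subst h
      exact le_trans (le_max_right _ _) (le_bRec_b _ _ _)
    · exact ih (j + 1) _ j' (by omega) (by omega)

theorem bRec_le {L : List Int} {m : Nat} {z : Int} :
    ∀ (c j : Nat) (b : Int), b ≤ z → (∀ j', j < j' → j' ≤ j + c → winS L m j' ≤ z) →
      bRec L m c j b ≤ z := by
  intro c
  induction c with
  | zero => intro j b hb _; exact hb
  | succ c ih =>
    intro j b hb hw
    refine ih (j + 1) _ (max_le hb (hw (j + 1) (by omega) (by omega))) ?_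
    intro j' h1 h2
    exact hw j' (by omega) (by omega)

-- B's foldl over range(m, len) computes bRec
theorem fold_eq (L : List Int) (mN : Nat) :
    ∀ (c j : Nat) (b : Int) (a : Int), a = ((j + mN : Nat) : Int) → j + mN + c = L.length →
      ((PySem.List.pyRange a ((L.length : Nat) : Int) 1).foldl
        (fun bw i =>
          let w := bw.2 + PySem.List.pyGetD L i 0 - PySem.List.pyGetD L (i - (mN : Int)) 0
          (max bw.1 w, w)) (b, winS L mN j)).1 = bRec L mN c j b := by
  intro c
  induction c with
  | zero =>
    intro j b a ha hc
    subst ha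
    rw [PySem.List.pyRange_one_eq_nil (by exact_mod_cast (by omega : L.length ≤ j + mN))]
    rfl
  | succ c ih =>
    intro j b a ha hc
    subst ha
    rw [PySem.List.pyRange_one_cons (by exact_mod_cast (by omega : j + mN < L.length))]
    simp only [List.foldl_cons]
    have hg1 : PySem.List.pyGetD L ((j + mN : Nat) : Int) 0 = L.getD (j + mN) 0 := by
      rw [PySem.List.pyGetD_natCast]
    have hg2 : PySem.List.pyGetD L (((j + mN : Nat) : Int) - (mN : Int)) 0 = L.getD j 0 := by
      have : ((j + mN : Nat) : Int) - (mN : Int) = ((j : Nat) : Int) := by push_cast; ring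
      rw [this, PySem.List.pyGetD_natCast]
    rw [hg1, hg2]
    have hw : winS L mN j + L.getD (j + mN) 0 - L.getD j 0 = winS L mN (j + 1) :=
      (winS_succ L mN j (by omega)).symm
    have hstart : ((j + mN : Nat) : Int) + 1 = (((j + 1) + mN : Nat) : Int) := by push_cast; ring
    simp only [hw, hstart]
    exact ih (j + 1) (max b (winS L mN (j + 1))) _ rfl (by omega)

theorem alt_eq (n k : Int) :
    subsum2_alt n k =
      bRec (altDigits n) (k.toNat ⊓ (altDigits n).length)
        ((altDigits n).length - k.toNat ⊓ (altDigits n).length) 0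
        (winS (altDigits n) (k.toNat ⊓ (altDigits n).length) 0) := by
  set L := altDigits n with hL
  set mN : Nat := k.toNat ⊓ L.length with hmN
  have hm : max 0 (min k (L.length : Int)) = ((mN : Nat) : Int) := by
    rw [hmN]; push_cast; omega
  show (let digits := L
    let m : Int := max 0 (min k (digits.length : Int))
    let w0 : Int := (PySem.List.slice digits none (some m)).sum
    let res := (PySem.List.pyRange m (digits.length : Int) 1).foldl
      (fun bw i =>
        let w := bw.2 + PySem.List.pyGetD digits i 0 - PySem.List.pyGetD digits (i - m) 0
        (max bw.1 w, w)) (w0, w0)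
    res.1) = _
  simp only [hm, PySem.List.slice_to_natCast]
  have hw0 : (L.take mN).sum = winS L mN 0 := by simp [winS]
  rw [hw0]
  exact fold_eq L mN (L.length - mN) 0 (winS L mN 0) ((mN : Nat) : Int) (by norm_num) (by omega)

theorem winS_nonneg {L : List Int} (hL : ∀ x ∈ L, 0 ≤ x) (m i : Nat) : 0 ≤ winS L m i := by
  refine List.sum_nonneg ?_
  intro x hx
  exact hL x (List.mem_of_mem_drop (List.mem_of_mem_take hx))

theorem winS_le_winS {L : List Int} (hL : ∀ x ∈ L, 0 ≤ x) (a b j i : Nat) (hji : j ≤ i)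
    (h2 : i + a ≤ j + b ∨ L.length ≤ j + b) : winS L a i ≤ winS L b j := by
  unfold winS
  have hdrop : L.drop i = (L.drop j).drop (i - j) := by
    rw [List.drop_drop]
    congr 1
    omega
  rcases h2 with h2 | h2
  · refine List.Sublist.sum_le_sum ?_ ?_
    · rw [hdrop]
      refine List.Sublist.trans ?_ (List.take_sublist_take_left (by omega : (i - j) + a ≤ b))
      rw [List.take_add]
      exact List.sublist_append_right _ _
    · intro x hx
      exact hL x (List.mem_of_mem_drop (List.mem_of_mem_take hx))
  · have hb : (L.drop j).take b = L.drop j := by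
      refine List.take_of_length_le ?_
      rw [List.length_drop]
      omega
    rw [hb]
    refine List.Sublist.sum_le_sum ?_ (fun x hx => hL x (List.mem_of_mem_drop hx))
    rw [hdrop]
    exact List.Sublist.trans (List.take_sublist _ _) (List.drop_sublist _ _)

-- ===== VERDICT (by name: the statement is the Claim_ definition above) =====
theorem subsum2_spec : Claim_equal_subsum2 := by
  intro n k _ hpre
  unfold Pre_subsum2 at hpre
  unfold Spec_subsum2
  set L := altDigits n with hLdef
  have hL : ∀ x ∈ L, 0 ≤ x := altDigits_nonneg n.toNat n (le_refl _)
  set K : Nat := k.toNat with hK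
  set m : Nat := K ⊓ L.length with hm
  set len : Nat := L.length with hlen
  have hA : subsum2 n k = aSpec K L 0 := loop_eq n.toNat n 0 k hpre (le_refl _)
  have hB : subsum2_alt n k = bRec L m (len - m) 0 (winS L m 0) := alt_eq n k
  rw [hA, hB]
  apply le_antisymm
  · -- A ≤ B
    refine aSpec_le L 0 ?_ ?_
    · exact le_trans (winS_nonneg hL m 0) (le_bRec_b _ _ _)
    · intro i hi
      set j : Nat := i ⊓ (len - m) with hj
      have h1 : winS L K i ≤ winS L m j := by
        refine winS_le_winS hL K m j i (by omega) (by omega)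
      refine le_trans h1 ?_
      by_cases hj0 : j = 0
      · rw [hj0]; exact le_bRec_b _ _ _
      · exact le_bRec_win (len - m) 0 (winS L m 0) j (by omega) (by omega)
  · -- B ≤ A
    refine bRec_le (len - m) 0 (winS L m 0) ?_ ?_
    · rcases Nat.eq_zero_or_pos len with h0 | h0
      · have : winS L m 0 = 0 := by
          have : L = [] := List.length_eq_zero_iff.mp h0
          simp [winS, this]
        rw [this]
        exact le_aSpec_acc L 0
      · exact le_trans (winS_le_winS hL m K 0 0 (le_refl _) (by omega))
          (le_aSpec_win L 0 0 h0)
    · intro j' h1 h2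
      by_cases hjl : j' < len
      · exact le_trans (winS_le_winS hL m K j' j' (le_refl _) (by omega))
          (le_aSpec_win L 0 j' hjl)
      · have hm0 : m = 0 := by omega
        have : winS L m j' = 0 := by simp [winS, hm0]
        rw [this]
        exact le_aSpec_acc L 0
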